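-- pv_equiv track=rewrite | github.com/scruffynerf/scromfyUI-AceStep | nodes/includes/zerobytes_utils.py | all_previous_same_type
-- ===== SOURCE A (Python) =====
-- SECTION_TYPE_IDS = {
--     "intro": 0, "verse": 1, "chorus": 2, "bridge": 3,
--     "outro": 4, "breakdown": 5, "drop": 6, "prechorus": 7,
-- }
--
-- def all_previous_same_type(sections: list, current_type: str,
--                             current_idx: int) -> list:
--     """Return list of (type_id, index) for all earlier sections of the same type."""
--     type_id = SECTION_TYPE_IDS.get(current_type, 1)
--     result = []
--     count = 0
--     for sec in sections:
--         if sec["type"] == current_type: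
--             if count < current_idx:
--                 result.append((type_id, count))
--             count += 1
--     return result
-- ===== SOURCE B (Python) =====
-- SECTION_TYPE_IDS = {
--     "intro": 0, "verse": 1, "chorus": 2, "bridge": 3,
--     "outro": 4, "breakdown": 5, "drop": 6, "prechorus": 7,
-- }
--
-- def all_previous_same_type(sections: list, current_type: str,
--                             current_idx: int) -> list:
--     """Return list of (type_id, index) for all earlier sections of the same type."""
--     num_matches = sum(1 for sec in sections if sec["type"] == current_type)
--     type_id = SECTION_TYPE_IDS.get(current_type, 1)
--     return [(type_id, i) for i in range(min(current_idx, num_matches))]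
-- ===== Notes on version B (the rewrite author's own statement) =====
-- stated objective: simpler
-- what changed: B replaces the interleaved filter/cap/append loop by a counting pass over the sections followed by a closed-form range comprehension [(type_id, i) for i in range(min(current_idx, num_matches))].
import Mathlib
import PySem

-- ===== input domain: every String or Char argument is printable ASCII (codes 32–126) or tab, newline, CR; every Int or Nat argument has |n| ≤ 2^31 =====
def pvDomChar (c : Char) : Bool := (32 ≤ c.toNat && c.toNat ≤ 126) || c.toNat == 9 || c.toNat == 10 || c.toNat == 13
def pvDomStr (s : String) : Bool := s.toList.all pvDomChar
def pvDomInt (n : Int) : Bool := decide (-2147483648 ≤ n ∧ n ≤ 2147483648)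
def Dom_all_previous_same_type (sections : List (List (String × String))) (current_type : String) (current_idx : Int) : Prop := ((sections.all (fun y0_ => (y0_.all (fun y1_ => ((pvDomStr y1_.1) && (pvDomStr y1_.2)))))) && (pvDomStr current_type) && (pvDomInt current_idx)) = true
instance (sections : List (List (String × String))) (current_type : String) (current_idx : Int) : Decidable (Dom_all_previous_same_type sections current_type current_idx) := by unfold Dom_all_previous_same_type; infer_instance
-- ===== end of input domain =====

-- B replaces A's interleaved filter/cap/append loop by a counting pass plus a range comprehension (objective: simpler).


-- ===== PORT A =====
def pvSectionTypeIds : PySem.Dict String Int :=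
  PySem.Dict.ofList [("intro", 0), ("verse", 1), ("chorus", 2), ("bridge", 3),
                     ("outro", 4), ("breakdown", 5), ("drop", 6), ("prechorus", 7)]

-- sec["type"] ported as getD with default ""; Pre_ restricts to sections that have the key, where this is exact.
def all_previous_same_type (sections : List (List (String × String))) (current_type : String) (current_idx : Int) : List (Int × Int) :=
  let type_id := PySem.Dict.getD pvSectionTypeIds current_type 1
  (sections.foldl
    (fun (st : List (Int × Int) × Int) sec =>
      if PySem.Dict.getD (PySem.Dict.mk sec) "type" "" == current_type then
        (if st.2 < current_idx then st.1 ++ [(type_id, st.2)] else st.1, st.2 + 1)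
      else st)
    ([], 0)).1

-- ===== PORT B =====
def all_previous_same_type_alt (sections : List (List (String × String))) (current_type : String) (current_idx : Int) : List (Int × Int) :=
  let num_matches : Int := sections.foldl
    (fun (acc : Int) sec =>
      if PySem.Dict.getD (PySem.Dict.mk sec) "type" "" == current_type then acc + 1 else acc) 0
  let type_id := PySem.Dict.getD pvSectionTypeIds current_type 1
  (PySem.List.pyRange 0 (min current_idx num_matches) 1).map (fun i => (type_id, i))

-- ===== PRECONDITION & SPEC =====
-- Pre_ excludes exactly the inputs where some section lacks the key "type": there Python A (and B) raise KeyError.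
def Pre_all_previous_same_type (sections : List (List (String × String))) (current_type : String) (current_idx : Int) : Prop :=
  ∀ sec ∈ sections, PySem.Dict.contains (PySem.Dict.mk sec) "type" = true
instance (sections : List (List (String × String))) (current_type : String) (current_idx : Int) : Decidable (Pre_all_previous_same_type sections current_type current_idx) := by unfold Pre_all_previous_same_type; infer_instance

def pvWitness_all_previous_same_type : (List (List (String × String))) × String × Int :=
  ([[("type", "verse")], [("type", "chorus")], [("type", "verse")]], "verse", 2)

def Spec_all_previous_same_type (sections : List (List (String × String))) (current_type : String) (current_idx : Int) (out : List (Int × Int)) : Prop := out = all_previous_same_type_alt sections current_type current_idx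
instance (sections : List (List (String × String))) (current_type : String) (current_idx : Int) (out : List (Int × Int)) : Decidable (Spec_all_previous_same_type sections current_type current_idx out) := by unfold Spec_all_previous_same_type; infer_instance

-- ===== CLAIM (what is proved, stated in full; the proofs are below) =====
def Claim_equal_all_previous_same_type : Prop := ∀ (sections : List (List (String × String))) (current_type : String) (current_idx : Int), Dom_all_previous_same_type sections current_type current_idx → Pre_all_previous_same_type sections current_type current_idx → Spec_all_previous_same_type sections current_type current_idx (all_previous_same_type sections current_type current_idx)

-- ===== LEMMAS AND PROOFS =====

-- B's counting foldl is countP (cast to Int), shifted by the accumulator.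
theorem pv_count_foldl (p : List (String × String) → Bool) :
    ∀ (secs : List (List (String × String))) (a : Int),
      secs.foldl (fun (acc : Int) sec => if p sec then acc + 1 else acc) a
        = a + (secs.countP p : Int) := by
  intro secs
  induction secs with
  | nil => intro a; simp
  | cons sec rest ih =>
    intro a
    by_cases h : p sec = true
    · simp [List.foldl, h, ih]
      ring
    · simp [List.foldl, h, ih]

-- A's loop from state (res, c) appends exactly the tuples (tid, i) for i in [c, min idx (c + matches)).
theorem pv_loopA (ct : String) (idx tid : Int) :
    ∀ (secs : List (List (String × String))) (res : List (Int × Int)) (c : Int),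
      secs.foldl
        (fun (st : List (Int × Int) × Int) sec =>
          if PySem.Dict.getD (PySem.Dict.mk sec) "type" "" == ct then
            (if st.2 < idx then st.1 ++ [(tid, st.2)] else st.1, st.2 + 1)
          else st)
        (res, c)
      = (res ++ (PySem.List.pyRange c (min idx (c + ((secs.countP
            (fun sec => PySem.Dict.getD (PySem.Dict.mk sec) "type" "" == ct)) : Int))) 1).map
            (fun i => (tid, i)),
         c + ((secs.countP (fun sec => PySem.Dict.getD (PySem.Dict.mk sec) "type" "" == ct)) : Int)) := by
  intro secs
  induction secs with
  | nil =>
    intro res c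
    rw [List.foldl_nil, List.countP_nil]
    rw [PySem.List.pyRange_one_eq_nil (by omega : min idx (c + ((0:Nat):Int)) ≤ c)]
    simp
  | cons sec rest ih =>
    intro res c
    rw [List.foldl_cons, List.countP_cons]
    by_cases h : (PySem.Dict.getD (PySem.Dict.mk sec) "type" "" == ct) = true
    · have hm : (0:Int) ≤ ((rest.countP (fun s => PySem.Dict.getD (PySem.Dict.mk s) "type" "" == ct)) : Int) := by positivity
      simp only [h, if_true]
      by_cases hc : c < idx
      · rw [if_pos hc, ih]
        simp only [Prod.mk.injEq]
        push_cast
        have e : min idx (c + (((rest.countP (fun s => PySem.Dict.getD (PySem.Dict.mk s) "type" "" == ct)) : Int) + 1))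
               = min idx (c + 1 + ((rest.countP (fun s => PySem.Dict.getD (PySem.Dict.mk s) "type" "" == ct)) : Int)) := by omega
        rw [e]
        have hlt : c < min idx (c + 1 + ((rest.countP (fun s => PySem.Dict.getD (PySem.Dict.mk s) "type" "" == ct)) : Int)) := by omega
        rw [PySem.List.pyRange_one_cons hlt]
        constructor
        · simp
        · omega
      · rw [if_neg hc, ih]
        simp only [Prod.mk.injEq]
        push_cast
        rw [PySem.List.pyRange_one_eq_nil (by omega :
              min idx (c + 1 + ((rest.countP (fun s => PySem.Dict.getD (PySem.Dict.mk s) "type" "" == ct)) : Int)) ≤ c + 1),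
            PySem.List.pyRange_one_eq_nil (by omega :
              min idx (c + (((rest.countP (fun s => PySem.Dict.getD (PySem.Dict.mk s) "type" "" == ct)) : Int) + 1)) ≤ c)]
        constructor
        · simp
        · omega
    · simp only [h, Bool.false_eq_true, if_false, add_zero]
      exact ih res c

-- ===== VERDICT (by name: the statement is the Claim_ definition above) =====
theorem all_previous_same_type_spec : Claim_equal_all_previous_same_type := by
  intro sections current_type current_idx _ _
  have h1 := pv_loopA current_type current_idx (pvSectionTypeIds.getD current_type 1) sections [] 0
  have h2 := pv_count_foldl (fun sec => PySem.Dict.getD (PySem.Dict.mk sec) "type" "" == current_type) sections 0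
  unfold Spec_all_previous_same_type
  simp only [all_previous_same_type, all_previous_same_type_alt]
  rw [h1, h2]
  simp
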